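-- pv_equiv track=rewrite | github.com/pypi-data/pypi-mirror-403 | packages/lib-log-rich/lib_log_rich-6.3.1.tar.gz/lib_log_rich-6.3.1/src/lib_log_rich/__main__.py | _extract_dotenv_flag
-- ===== SOURCE A (Python) =====
-- from collections.abc import Callable, Sequence
-- from typing import Final, cast
--
-- _DOTENV_ENABLE_FLAG: Final[str] = "--use-dotenv"  # CLI toggle, not a credential
--
-- _DOTENV_DISABLE_FLAG: Final[str] = "--no-use-dotenv"  # CLI toggle, not a credential
--
-- def _extract_dotenv_flag(argv: Sequence[str] | None) -> bool | None:
--     """Return the last explicit ``--use-dotenv`` flag if present."""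
--     if not argv:
--         return None
--     flag: bool | None = None
--     for token in argv:
--         if token == _DOTENV_ENABLE_FLAG:
--             flag = True
--         elif token == _DOTENV_DISABLE_FLAG:
--             flag = False
--     return flag
-- ===== SOURCE B (Python) =====
-- _DOTENV_ENABLE_FLAG = "--use-dotenv"
-- _DOTENV_DISABLE_FLAG = "--no-use-dotenv"
--
-- def _extract_dotenv_flag(argv):
--     """Return the last explicit ``--use-dotenv`` flag if present."""
--     if not argv:
--         return None
--     for token in reversed(argv):
--         if token == _DOTENV_ENABLE_FLAG:
--             return True
--         if token == _DOTENV_DISABLE_FLAG: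
--             return False
--     return None
-- ===== Notes on version B (the rewrite author's own statement) =====
-- stated objective: idiomatic
-- what changed: Replaces the forward full scan that keeps overwriting an accumulator with a reverse scan that returns on the first matching flag (the last occurrence), short-circuiting instead of maintaining state.
import Mathlib
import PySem

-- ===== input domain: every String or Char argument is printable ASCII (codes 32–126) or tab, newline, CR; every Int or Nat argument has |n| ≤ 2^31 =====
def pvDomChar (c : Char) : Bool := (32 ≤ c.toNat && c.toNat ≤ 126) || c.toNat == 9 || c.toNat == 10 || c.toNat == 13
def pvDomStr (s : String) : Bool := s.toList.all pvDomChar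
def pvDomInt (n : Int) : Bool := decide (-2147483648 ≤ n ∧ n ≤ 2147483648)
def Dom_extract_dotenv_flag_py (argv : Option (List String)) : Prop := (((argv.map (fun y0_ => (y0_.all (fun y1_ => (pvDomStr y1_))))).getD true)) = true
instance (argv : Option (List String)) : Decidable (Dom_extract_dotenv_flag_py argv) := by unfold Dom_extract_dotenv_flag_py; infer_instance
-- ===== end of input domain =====

-- B replaces A's forward accumulator-overwrite scan with a reverse short-circuiting scan returning the first (i.e. last) flag hit; same behaviour, more idiomatic.


-- ===== PORT A =====
-- literal port of A: forward scan overwriting `flag`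
def extract_dotenv_flag_py (argv : Option (List String)) : Option Bool :=
  match argv with
  | none => none
  | some l =>
    if l = [] then none
    else
      l.foldl (fun flag token =>
        if token = "--use-dotenv" then some true
        else if token = "--no-use-dotenv" then some false
        else flag) none

-- ===== PORT B =====
-- port of B: reverse scan, return on first match
def pvAltScan : List String → Option Bool
  | [] => none
  | token :: rest =>
    if token = "--use-dotenv" then some true
    else if token = "--no-use-dotenv" then some false
    else pvAltScan rest

def extract_dotenv_flag_py_alt (argv : Option (List String)) : Option Bool :=
  match argv with
  | none => none
  | some l =>
    if l = [] then none
    else pvAltScan l.reverse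

-- ===== PRECONDITION & SPEC =====
def Spec_extract_dotenv_flag_py (argv : Option (List String)) (out : Option Bool) : Prop := out = extract_dotenv_flag_py_alt argv
instance (argv : Option (List String)) (out : Option Bool) : Decidable (Spec_extract_dotenv_flag_py argv out) := by unfold Spec_extract_dotenv_flag_py; infer_instance

-- ===== CLAIM (what is proved, stated in full; the proofs are below) =====
def Claim_equal_extract_dotenv_flag_py : Prop := ∀ (argv : Option (List String)), Dom_extract_dotenv_flag_py argv → Spec_extract_dotenv_flag_py argv (extract_dotenv_flag_py argv)

-- ===== LEMMAS AND PROOFS =====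

-- ===== VERDICT (by name: the statement is the Claim_ definition above) =====
lemma pvAltScan_append (xs : List String) (t : String) :
    pvAltScan (xs ++ [t]) =
      (match pvAltScan xs with
       | some b => some b
       | none =>
         if t = "--use-dotenv" then some true
         else if t = "--no-use-dotenv" then some false
         else none) := by
  induction xs with
  | nil => simp [pvAltScan]
  | cons h rest ih =>
    simp only [List.cons_append, pvAltScan]
    split_ifs <;> simp [ih] <;> rcases pvAltScan rest <;> simp [*]

lemma foldl_eq_altScan (l : List String) (acc : Option Bool) :
    l.foldl (fun flag token =>
      if token = "--use-dotenv" then some true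
      else if token = "--no-use-dotenv" then some false
      else flag) acc =
    (match pvAltScan l.reverse with
     | some b => some b
     | none => acc) := by
  induction l generalizing acc with
  | nil => simp [pvAltScan]
  | cons t rest ih =>
    simp only [List.foldl_cons, List.reverse_cons]
    rw [ih, pvAltScan_append]
    split_ifs <;> rcases pvAltScan rest.reverse <;> simp

theorem extract_dotenv_flag_py_spec : Claim_equal_extract_dotenv_flag_py := by
  intro argv _
  unfold Spec_extract_dotenv_flag_py extract_dotenv_flag_py extract_dotenv_flag_py_alt
  match argv with
  | none => rfl
  | some l =>
    by_cases h : l = [] <;> simp [h, foldl_eq_altScan] <;> rcases pvAltScan l.reverse <;> rfl
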